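-- pv_equiv track=rewrite | github.com/abdulshameed-lang/query-tuner-tool- | backend/app/core/oracle/bug_patterns.py | _version_affected
-- ===== SOURCE A (Python) =====
-- from typing import List, Dict, Any
--
-- def _version_affected(
--     version: str, affected_versions: List[str]
-- ) -> bool:
--     """
--     Check if a version is affected by a bug.
--
--     Args:
--         version: Oracle version to check
--         affected_versions: List of affected versions
--
--     Returns:
--         True if version is affected
--     """
--     for affected in affected_versions:
--         # Exact match
--         if version == affected:
--             return True
--
--         # Wildcard match (e.g., "12.1.%" matches "12.1.0.1")
--         if "%" in affected:
--             prefix = affected.replace("%", "")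
--             if version.startswith(prefix):
--                 return True
--
--     return False
-- ===== SOURCE B (Python) =====
-- def _version_affected(version, affected_versions):
--     # Prefix-set approach: precompute a set of all affected strings and a set of
--     # '%'-stripped wildcard prefixes; then test only the prefixes of `version`
--     # whose length actually occurs in that set.
--     if version in set(affected_versions):
--         return True
--     wild_prefixes = {a.replace("%", "") for a in affected_versions if "%" in a}
--     lengths = {len(p) for p in wild_prefixes}
--     return any(version[:k] in wild_prefixes for k in lengths if k <= len(version))
-- ===== Notes on version B (the rewrite author's own statement) =====
-- stated objective: alternative
-- what changed: Instead of scanning entries and calling startswith per entry, B precomputes a hash set of affected strings and a hash set of '%'-stripped wildcard prefixes together with their length set, then tests only the prefixes of `version` with those lengths for set membership, so no per-entry startswith scan remains.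
import Mathlib
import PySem

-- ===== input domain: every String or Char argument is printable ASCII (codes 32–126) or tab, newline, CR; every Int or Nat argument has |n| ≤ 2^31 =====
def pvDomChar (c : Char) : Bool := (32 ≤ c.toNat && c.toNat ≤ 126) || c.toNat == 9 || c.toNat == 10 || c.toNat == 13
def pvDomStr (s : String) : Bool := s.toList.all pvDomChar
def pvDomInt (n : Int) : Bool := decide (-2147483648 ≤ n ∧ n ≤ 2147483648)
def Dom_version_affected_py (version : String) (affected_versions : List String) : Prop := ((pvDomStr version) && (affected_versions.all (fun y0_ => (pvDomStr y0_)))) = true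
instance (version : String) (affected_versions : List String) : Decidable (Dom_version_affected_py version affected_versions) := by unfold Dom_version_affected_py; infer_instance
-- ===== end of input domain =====

-- B replaces A's per-entry startswith scan by precomputed sets (exact strings,
-- '%'-stripped wildcard prefixes) and a scan over the prefixes of `version`
-- itself; objective: alternative algorithm, same observable result.


-- ===== PORT A =====
def version_affected_py (version : String) (affected_versions : List String) : Bool :=
  match affected_versions with
  | [] => false
  | affected :: rest =>
    if version == affected then true
    else if PySem.Str.isIn "%" affected then
      if PySem.Str.startswith version (PySem.Str.replace affected "%" "") then true
      else version_affected_py version rest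
    else version_affected_py version rest

-- ===== PORT B =====
-- B: `version in set(affected_versions)`, then `any(version[:k] in wild_prefixes
-- for k in lengths if k <= len(version))` where lengths is the set of lengths
-- of the stripped wildcard prefixes (a set-comprehension consumed by any:
-- order-independent).
def version_affected_py_alt (version : String) (affected_versions : List String) : Bool :=
  if PySem.Set.contains (PySem.Set.ofList affected_versions) version then true
  else
    (PySem.Set.ofList (((affected_versions.filter (fun a => PySem.Str.isIn "%" a)).map
        (fun a => PySem.Str.replace a "%" "")).map (fun p => PySem.Str.len p))).any
      (fun k => decide (k ≤ PySem.Str.len version) &&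
        PySem.Set.contains
          (PySem.Set.ofList ((affected_versions.filter (fun a => PySem.Str.isIn "%" a)).map
            (fun a => PySem.Str.replace a "%" "")))
          (PySem.Str.slice version none (some k)))

-- ===== PRECONDITION & SPEC =====
def Spec_version_affected_py (version : String) (affected_versions : List String) (out : Bool) : Prop := out = version_affected_py_alt version affected_versions
instance (version : String) (affected_versions : List String) (out : Bool) : Decidable (Spec_version_affected_py version affected_versions out) := by unfold Spec_version_affected_py; infer_instance

-- ===== CLAIM =====
def Claim_equal_version_affected_py : Prop := ∀ (version : String) (affected_versions : List String), Dom_version_affected_py version affected_versions → Spec_version_affected_py version affected_versions (version_affected_py version affected_versions)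

-- ===== LEMMAS AND PROOFS =====
-- A unrolled: exact membership OR some stripped wildcard prefix is a prefix.
theorem version_affected_chars (version : String) (l : List String) :
    version_affected_py version l =
      (l.contains version ||
        ((l.filter (fun a => PySem.Str.isIn "%" a)).map
            (fun a => PySem.Str.replace a "%" "")).any
          (fun p => PySem.Str.startswith version p)) := by
  induction l with
  | nil => rfl
  | cons a rest ih =>
    simp only [version_affected_py, List.contains_cons, List.filter_cons]
    by_cases h1 : version == a
    · have h1' : version = a := by simpa using h1
      subst h1'
      simp
    · have hba : (a == version) = false := by
        cases hb : a == version with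
        | false => rfl
        | true => exact absurd (by simpa [eq_comm] using (beq_iff_eq.mp hb)) (by simpa using h1)
      have h1' : ¬ version = a := by simpa using h1
      by_cases h2 : PySem.Str.isIn "%" a
      · by_cases h3 : PySem.Str.startswith version (PySem.Str.replace a "%" "")
        · simp at h2 h3
          simp [h1, h2, h3]
        · simp at h2 h3
          simp [h1, h2, h3, ih]
      · simp at h2
        simp [h1, h2, ih]

-- B's length-set pass equals the startswith scan over the same list.
theorem any_prefix_eq (v : String) (P : List String) :
    (PySem.Set.ofList (P.map (fun p => PySem.Str.len p))).any
        (fun k => decide (k ≤ PySem.Str.len v) &&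
          PySem.Set.contains (PySem.Set.ofList P) (PySem.Str.slice v none (some k)))
      = P.any (fun p => PySem.Str.startswith v p) := by
  rw [Bool.eq_iff_iff]
  simp only [List.any_eq_true, PySem.Set.contains, Bool.and_eq_true, decide_eq_true_eq]
  constructor
  · rintro ⟨k, hk, hkle, hmem⟩
    have hk0 : (0:Int) ≤ k := by
      have hk' : k ∈ P.map (fun p => PySem.Str.len p) :=
        (PySem.Set.mem_ofList _ _).mp hk
      obtain ⟨p, -, rfl⟩ := List.mem_map.mp hk'
      simp [PySem.Str.len_eq]
    have hmem' : PySem.Str.slice v none (some k) ∈ P := by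
      have : PySem.Str.slice v none (some k) ∈ PySem.Set.ofList P := by
        simpa using hmem
      exact (PySem.Set.mem_ofList P _).mp this
    refine ⟨_, hmem', ?_⟩
    simp only [PySem.Str.startswith, PySem.Chars.startswith, List.isPrefixOf_iff_prefix,
      PySem.Str.slice, PySem.Chars.slice, PySem.List.slice_to _ hk0]
    simpa using List.take_prefix k.toNat v.toList
  · rintro ⟨p, hp, hsw⟩
    have hpref : p.toList <+: v.toList := by
      simpa [PySem.Str.startswith, PySem.Chars.startswith, List.isPrefixOf_iff_prefix] using hsw
    refine ⟨(p.toList.length : Int), ?_, ?_, ?_⟩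
    · exact (PySem.Set.mem_ofList _ _).mpr
        (List.mem_map.mpr ⟨p, hp, by simp [PySem.Str.len_eq]⟩)
    · have := hpref.length_le
      simp only [PySem.Str.len_eq]
      omega
    · have hslice : PySem.Str.slice v none (some (p.toList.length : Int)) = p := by
        have ht := List.prefix_iff_eq_take.mp hpref
        simp only [PySem.Str.slice, PySem.Chars.slice,
          PySem.List.slice_to _ (by positivity : (0:Int) ≤ (p.toList.length : Int)),
          Int.toNat_natCast]
        rw [← ht]
        simp
      rw [hslice]
      simpa using (PySem.Set.mem_ofList P p).mpr hp

-- B in the same normal form as A.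
theorem alt_eq (version : String) (l : List String) :
    version_affected_py_alt version l =
      (l.contains version ||
        ((l.filter (fun a => PySem.Str.isIn "%" a)).map
            (fun a => PySem.Str.replace a "%" "")).any
          (fun p => PySem.Str.startswith version p)) := by
  have hc : PySem.Set.contains (PySem.Set.ofList l) version = l.contains version := by
    rw [Bool.eq_iff_iff]
    simp [PySem.Set.contains, PySem.Set.mem_ofList]
  unfold version_affected_py_alt
  rw [hc]
  by_cases h : l.contains version = true
  · rw [if_pos h, h, Bool.true_or]
  · rw [if_neg h, any_prefix_eq]
    have h' : l.contains version = false := by simpa using h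
    rw [h', Bool.false_or]

-- ===== VERDICT =====
theorem version_affected_py_spec : Claim_equal_version_affected_py := by
  intro version l _
  unfold Spec_version_affected_py
  rw [version_affected_chars, alt_eq]
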